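-- pv_equiv track=rewrite | github.com/Wanff/scrapers | twitter_scraper.py | convert_special_tokens_to_ascii
-- ===== SOURCE A (Python) =====
-- def convert_special_tokens_to_ascii(string):
--     special_tokens = {
--         '@': '%40',
--         '"': '%22'
--         # Add more special tokens and their corresponding ASCII values here if needed
--     }
--
--     converted_string = ''
--     for char in string:
--         if char in special_tokens:
--             converted_string += special_tokens[char]
--         else:
--             converted_string += char
--
--     return converted_string
-- ===== SOURCE B (Python) =====
-- def convert_special_tokens_to_ascii(string):
--     # Two sequential full-string scans, one per special token, instead of a
--     # single char-by-char pass through a dict. Safe: '%40' and '%22' contain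
--     # neither '@' nor '"', so the passes are order-independent.
--     return string.replace('@', '%40').replace('"', '%22')
-- ===== Notes on version B (the rewrite author's own statement) =====
-- stated objective: idiomatic
-- what changed: Replaced the single char-by-char pass that dispatches each character through a dict and appends to a growing string with two chained str.replace scans, one per special token (safe since '%40' and '%22' contain neither '@' nor '"').
import Mathlib
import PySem

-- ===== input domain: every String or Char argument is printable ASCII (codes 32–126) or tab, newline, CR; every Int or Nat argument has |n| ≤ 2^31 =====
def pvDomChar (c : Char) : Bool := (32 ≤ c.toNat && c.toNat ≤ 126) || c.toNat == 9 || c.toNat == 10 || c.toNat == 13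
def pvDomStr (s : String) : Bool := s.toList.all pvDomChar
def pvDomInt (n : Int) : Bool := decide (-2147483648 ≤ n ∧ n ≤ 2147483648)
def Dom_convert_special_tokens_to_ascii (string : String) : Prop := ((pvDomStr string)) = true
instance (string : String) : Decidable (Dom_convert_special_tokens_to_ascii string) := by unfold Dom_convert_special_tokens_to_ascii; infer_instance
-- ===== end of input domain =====

-- B replaces A's single char-by-char pass through a token dict with two chained
-- str.replace scans, one per special token (idiomatic; same return value).


-- ===== PORT A =====
-- the literal `special_tokens` dict (keys are the single characters; values as code-point lists)
def pvSpecialTokens : PySem.Dict Char (List Char) :=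
  PySem.Dict.ofList [('@', "%40".toList), ('"', "%22".toList)]

def convert_special_tokens_to_ascii (string : String) : String :=
  String.ofList
    (string.toList.foldl
      (fun acc c =>
        if pvSpecialTokens.contains c then acc ++ (pvSpecialTokens.get? c).getD [c]
        else acc ++ [c])
      [])

-- ===== PORT B =====
def convert_special_tokens_to_ascii_alt (string : String) : String :=
  PySem.Str.replace (PySem.Str.replace string "@" "%40") "\"" "%22"

-- ===== PRECONDITION & SPEC =====
def Spec_convert_special_tokens_to_ascii (string : String) (out : String) : Prop := out = convert_special_tokens_to_ascii_alt string
instance (string : String) (out : String) : Decidable (Spec_convert_special_tokens_to_ascii string out) := by unfold Spec_convert_special_tokens_to_ascii; infer_instance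

-- ===== CLAIM (what is proved, stated in full; the proofs are below) =====
def Claim_equal_convert_special_tokens_to_ascii : Prop := ∀ (string : String), Dom_convert_special_tokens_to_ascii string → Spec_convert_special_tokens_to_ascii string (convert_special_tokens_to_ascii string)

-- ===== LEMMAS AND PROOFS =====

-- single-char substitution step of a replace pass
def pvSub (o : Char) (new : List Char) (c : Char) : List Char :=
  if c = o then new else [c]

-- Chars.replace.go with a single-character pattern is flatMap of the substitution
theorem pv_replace_go_single (o : Char) (new : List Char) :
    ∀ (fuel : Nat) (l acc : List Char), l.length ≤ fuel →
      PySem.Chars.replace.go [o] new fuel l acc = acc.reverse ++ l.flatMap (pvSub o new) := by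
  intro fuel
  induction fuel with
  | zero =>
    intro l acc h
    have : l = [] := List.eq_nil_of_length_eq_zero (Nat.le_zero.mp h)
    subst this
    simp [PySem.Chars.replace.go]
  | succ n ih =>
    intro l acc h
    cases l with
    | nil => simp [PySem.Chars.replace.go]
    | cons c t =>
      by_cases hc : c = o
      · subst hc
        have hp : List.isPrefixOf [c] (c :: t) = true := by
          simp [List.isPrefixOf]
        rw [PySem.Chars.replace.go]
        simp only [hp, if_true, List.length_cons, List.length_nil, List.drop_succ_cons,
          List.drop_zero]
        rw [ih t (new.reverse ++ acc) (by simpa using Nat.le_of_succ_le_succ h)]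
        simp [pvSub]
      · have hp : List.isPrefixOf [o] (c :: t) = false := by
          simp [List.isPrefixOf]
          exact fun h' => (hc h'.symm).elim
        rw [PySem.Chars.replace.go]
        simp only [hp, if_false, Bool.false_eq_true]
        rw [ih t (c :: acc) (by simpa using Nat.le_of_succ_le_succ h)]
        simp [pvSub, hc]

theorem pv_replace_single (s : List Char) (o : Char) (new : List Char) :
    PySem.Chars.replace s [o] new = s.flatMap (pvSub o new) := by
  rw [PySem.Chars.replace]
  simp only [List.isEmpty_cons, Bool.false_eq_true, if_false]
  simpa using pv_replace_go_single o new s.length s [] le_rfl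

-- fused form: applying the '"' pass to the result of the '@' pass on one character
theorem pv_fuse (c : Char) :
    ((pvSub '@' "%40".toList c).flatMap (pvSub '"' "%22".toList))
      = (if pvSpecialTokens.contains c then (pvSpecialTokens.get? c).getD [c] else [c]) := by
  by_cases h1 : c = '@'
  · subst h1; decide
  · by_cases h2 : c = '"'
    · subst h2; decide
    · have hit : pvSpecialTokens.items = [('@', "%40".toList), ('"', "%22".toList)] := by
        decide
      simp [pvSub, h1, h2, PySem.Dict.contains, hit, Ne.symm h1, Ne.symm h2]

theorem convert_special_tokens_to_ascii_spec : Claim_equal_convert_special_tokens_to_ascii := by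
  intro s _
  unfold Spec_convert_special_tokens_to_ascii
  unfold convert_special_tokens_to_ascii convert_special_tokens_to_ascii_alt
  rw [PySem.Str.replace, PySem.Str.replace]
  rw [String.toList_ofList, String.toList_ofList]
  simp only [show ("\"".toList = ['"']) from rfl]
  rw [pv_replace_single, pv_replace_single, List.flatMap_assoc]
  have hbody : (fun (acc : List Char) (c : Char) =>
      if pvSpecialTokens.contains c then acc ++ (pvSpecialTokens.get? c).getD [c]
      else acc ++ [c])
      = fun acc c => acc ++ (if pvSpecialTokens.contains c
                             then (pvSpecialTokens.get? c).getD [c] else [c]) := by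
    funext acc c; split_ifs <;> rfl
  rw [hbody, PySem.List.foldl_append_eq_flatMap]
  congr 1
  simp only [List.nil_append]
  exact List.flatMap_congr (fun c _ => (pv_fuse c).symm)
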